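-- pv_equiv track=rewrite | github.com/edutilos6666/CL_Uebung2 | Hausaufgabe6/HA6.py | calculate_whole_frequency
-- ===== SOURCE A (Python) =====
-- def calculate_whole_frequency (rules):
--     # ret ist der Rueckgawert der Funktion
--     ret = dict()
--     # rules dict wird iteriert
--     for rule , freq in rules.items():
--         # rule (key) wird mit dem " --> " als Separator aufgeteilt und
--         # dem splitted zugewiesen.
--         splitted = rule.split(" --> ")
--         # splitted[0] wird dem parent_rule zugewiesen.
--         parent_rule = splitted[0]
--         # Wert mit dem key parent_rule von ret abgefragt , unnd dict den abgefragten key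
--         # nicht enthaelt 0 wird zurueckgegeben.
--         whole_freq = ret.get(parent_rule, 0)
--         # whole_freq wird um freq erhoeht
--         whole_freq += freq
--         # Dem Entry mit key parent_rule in ret wird whole_freq zugewiesen.
--         ret[parent_rule] = whole_freq
--
--     # ret wird zurueckgegeben.
--     return ret
-- ===== SOURCE B (Python) =====
-- def calculate_whole_frequency(rules):
--     # One pass to extract (parent, freq) pairs, then a dict comprehension that,
--     # for each distinct parent (first-appearance order), sums the matching freqs.
--     pairs = [(r.split(" --> ")[0], f) for r, f in rules.items()]
--     return {p: sum(f for q, f in pairs if q == p)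
--             for p in dict.fromkeys(q for q, _ in pairs)}
-- ===== Notes on version B (the rewrite author's own statement) =====
-- stated objective: alternative
-- what changed: Replaces the single hash-accumulation loop (get-then-overwrite on a dict) with a two-phase comprehension: extract (parent,freq) pairs once, deduplicate the parents in first-appearance order via dict.fromkeys, and compute each group's total by a filtered sum over the pair list.
import Mathlib
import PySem

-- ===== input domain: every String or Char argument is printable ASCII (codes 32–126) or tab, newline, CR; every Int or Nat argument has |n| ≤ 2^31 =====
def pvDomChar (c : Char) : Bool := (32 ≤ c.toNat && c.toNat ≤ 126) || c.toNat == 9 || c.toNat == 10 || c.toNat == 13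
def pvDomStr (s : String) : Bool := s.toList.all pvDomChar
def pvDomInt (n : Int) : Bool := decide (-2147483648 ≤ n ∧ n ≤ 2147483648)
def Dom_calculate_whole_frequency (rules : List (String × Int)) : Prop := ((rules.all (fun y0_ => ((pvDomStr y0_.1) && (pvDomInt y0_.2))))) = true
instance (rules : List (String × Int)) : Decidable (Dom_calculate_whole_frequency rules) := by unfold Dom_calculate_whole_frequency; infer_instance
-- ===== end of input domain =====

-- B replaces A's single hash-accumulation loop by a two-phase comprehension
-- (extract (parent,freq) pairs, dedup parents in first-appearance order, sum each
-- group by a filtered scan); objective: alternative decomposition, same results.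


-- ===== PORT A =====
-- rule.split(" --> ") → PySem.Str.split? (none only for an empty separator, never here);
-- splitted[0] → headD "" (split always returns a nonempty list, so exact).
def calculate_whole_frequency (rules : List (String × Int)) : List (String × Int) :=
  (rules.foldl
    (fun (ret : PySem.Dict String Int) rf =>
      let splitted := (PySem.Str.split? rf.1 " --> ").getD []
      let parent_rule := splitted.headD ""
      let whole_freq := ret.getD parent_rule 0
      ret.insert parent_rule (whole_freq + rf.2))
    PySem.Dict.empty).items

-- ===== PORT B =====
-- dict.fromkeys(...) as ordered dedup → PySem.List.dedup; the dict comprehension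
-- over the deduped parents → List.map building (parent, filtered sum).
def calculate_whole_frequency_alt (rules : List (String × Int)) : List (String × Int) :=
  let pairs := rules.map (fun rf => (((PySem.Str.split? rf.1 " --> ").getD []).headD "", rf.2))
  (PySem.List.dedup (pairs.map Prod.fst)).map
    (fun p => (p, ((pairs.filter (fun qf => qf.1 == p)).map Prod.snd).sum))

-- ===== PRECONDITION & SPEC =====
def Spec_calculate_whole_frequency (rules : List (String × Int)) (out : List (String × Int)) : Prop := out = calculate_whole_frequency_alt rules
instance (rules : List (String × Int)) (out : List (String × Int)) : Decidable (Spec_calculate_whole_frequency rules out) := by unfold Spec_calculate_whole_frequency; infer_instance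

-- ===== CLAIM (what is proved, stated in full; the proofs are below) =====
def Claim_equal_calculate_whole_frequency : Prop := ∀ (rules : List (String × Int)), Dom_calculate_whole_frequency rules → Spec_calculate_whole_frequency rules (calculate_whole_frequency rules)

-- ===== LEMMAS AND PROOFS =====

-- The "table" built from a key list L and a value function g: L.map (fun p => (p, g p)).
-- find? on such a table returns (k, g k) iff k ∈ L (first occurrence has value g k too).
theorem pv_find_table (L : List String) (g : String → Int) (k : String) :
    List.find? (fun p => p.1 == k) (L.map (fun p => (p, g p)))
      = if k ∈ L then some (k, g k) else none := by
  induction L with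
  | nil => simp
  | cons a t ih =>
    by_cases h : a = k
    · subst h; simp
    · simp only [List.map_cons, List.find?, List.mem_cons]
      have : ((a, g a).1 == k) = false := by simpa using h
      have h' : ¬ (k = a) := fun he => h he.symm
      simp [this, ih, h']

theorem pv_contains_table (L : List String) (g : String → Int) (k : String) :
    (L.map (fun p => (p, g p))).any (fun p => p.1 == k) = decide (k ∈ L) := by
  induction L with
  | nil => simp
  | cons a t ih =>
    by_cases h : a = k
    · subst h; simp
    · simp [ih, h, Ne.symm h]

-- group sum over a pair list
def pvSum (ps : List (String × Int)) (p : String) : Int :=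
  ((ps.filter (fun qf => qf.1 == p)).map Prod.snd).sum

theorem pvSum_append_single (ps : List (String × Int)) (x : String × Int) (p : String) :
    pvSum (ps ++ [x]) p = pvSum ps p + (if x.1 = p then x.2 else 0) := by
  by_cases h : x.1 = p <;> simp [pvSum, List.filter_append, h]

theorem pvSum_of_not_mem (ps : List (String × Int)) (p : String)
    (h : p ∉ ps.map Prod.fst) : pvSum ps p = 0 := by
  have : ps.filter (fun qf => qf.1 == p) = [] := by
    rw [List.filter_eq_nil_iff]
    intro a ha
    simp only [beq_iff_eq]
    exact fun he => h (he ▸ List.mem_map_of_mem ha)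
  simp [pvSum, this]

-- Core invariant: A's accumulation fold, as an items list, IS B's dedup-and-sum table.
theorem pv_fold_eq_table (ps : List (String × Int)) :
    (ps.foldl (fun (d : PySem.Dict String Int) kv => d.insert kv.1 (d.getD kv.1 0 + kv.2))
        PySem.Dict.empty).items
      = (PySem.List.dedup (ps.map Prod.fst)).map (fun p => (p, pvSum ps p)) := by
  induction ps using List.reverseRecOn with
  | nil => rfl
  | append_singleton qs x ih =>
    obtain ⟨k, v⟩ := x
    rw [List.foldl_append, List.foldl_cons, List.foldl_nil]
    generalize hD : (qs.foldl (fun (d : PySem.Dict String Int) kv =>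
        d.insert kv.1 (d.getD kv.1 0 + kv.2)) PySem.Dict.empty) = D at ih
    obtain ⟨its⟩ := D
    -- (items is the structure field)
    subst ih
    have hded : PySem.List.dedup ((qs ++ [(k, v)]).map Prod.fst)
        = PySem.Set.add (PySem.List.dedup (qs.map Prod.fst)) k := by
      simp [PySem.List.dedup, PySem.Set.ofList, List.foldl_append]
    by_cases hk : k ∈ qs.map Prod.fst
    · -- k already seen: insert overwrites in place, dedup unchanged
      have hmem : k ∈ PySem.List.dedup (qs.map Prod.fst) := by
        simpa [PySem.List.mem_dedup] using hk
      have hcont : (PySem.Dict.mk ((PySem.List.dedup (qs.map Prod.fst)).map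
          (fun p => (p, pvSum qs p)))).contains k = true := by
        simp only [PySem.Dict.contains]
        rw [pv_contains_table]; simpa using hmem
      have hget : (PySem.Dict.mk ((PySem.List.dedup (qs.map Prod.fst)).map
          (fun p => (p, pvSum qs p)))).getD k 0 = pvSum qs k := by
        simp only [PySem.Dict.getD, PySem.Dict.get?]
        rw [pv_find_table]
        have hmem' : k ∈ PySem.Set.ofList (qs.map Prod.fst) := hmem
        simp [hmem']
      rw [hded]
      have hadd : PySem.Set.add (PySem.List.dedup (qs.map Prod.fst)) k
          = PySem.List.dedup (qs.map Prod.fst) := by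
        simp only [PySem.Set.add, PySem.Set.contains]
        rw [if_pos (by simpa using hmem)]
      rw [hadd]
      simp only [PySem.Dict.insert, hcont, if_pos, hget, List.map_map]
      apply List.map_congr_left
      intro p _
      by_cases hpk : p = k
      · subst hpk
        simp [pvSum_append_single]
      · have : (((p, pvSum qs p) : String × Int).1 == k) = false := by simpa using hpk
        simp [Function.comp, this, pvSum_append_single, Ne.symm hpk]
    · -- new key: insert appends, dedup appends
      have hnmem : k ∉ PySem.List.dedup (qs.map Prod.fst) := by
        simpa [PySem.List.mem_dedup] using hk
      have hcont : (PySem.Dict.mk ((PySem.List.dedup (qs.map Prod.fst)).map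
          (fun p => (p, pvSum qs p)))).contains k = false := by
        simp only [PySem.Dict.contains]
        rw [pv_contains_table]; simpa using hnmem
      have hget : (PySem.Dict.mk ((PySem.List.dedup (qs.map Prod.fst)).map
          (fun p => (p, pvSum qs p)))).getD k 0 = 0 := by
        simp only [PySem.Dict.getD, PySem.Dict.get?]
        rw [pv_find_table]
        have hnmem' : k ∉ PySem.Set.ofList (qs.map Prod.fst) := hnmem
        simp [hnmem']
      rw [hded]
      have hadd : PySem.Set.add (PySem.List.dedup (qs.map Prod.fst)) k
          = PySem.List.dedup (qs.map Prod.fst) ++ [k] := by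
        simp only [PySem.Set.add, PySem.Set.contains]
        rw [if_neg (by simpa using hnmem)]
      rw [hadd]
      simp only [PySem.Dict.insert, hcont, Bool.false_eq_true, if_neg, not_false_iff,
        hget, List.map_append, List.map_cons, List.map_nil]
      congr 1
      · apply List.map_congr_left
        intro p hp
        have hpk : p ≠ k := fun he => hnmem (he ▸ hp)
        simp [pvSum_append_single, Ne.symm hpk]
      · simp [pvSum_append_single, pvSum_of_not_mem qs k hk]

-- ===== VERDICT (by name: the statement is the Claim_ definition above) =====
theorem calculate_whole_frequency_spec : Claim_equal_calculate_whole_frequency := by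
  intro rules _
  show calculate_whole_frequency rules = calculate_whole_frequency_alt rules
  unfold calculate_whole_frequency calculate_whole_frequency_alt
  rw [← List.foldl_map
      (f := fun rf : String × Int => (((PySem.Str.split? rf.1 " --> ").getD []).headD "", rf.2))
      (g := fun (d : PySem.Dict String Int) kv => d.insert kv.1 (d.getD kv.1 0 + kv.2))]
  exact pv_fold_eq_table _
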